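-- pv_equiv track=rewrite | github.com/rahul3399/kite-backtester | app/core/metrics.py | _calculate_consecutive_stats
-- ===== SOURCE A (Python) =====
-- from typing import Dict, List, Optional, Any, Tuple
--
-- def _calculate_consecutive_stats(trades: List[Dict[str, Any]]) -> Dict[str, float]:
--     """Calculate consecutive win/loss statistics"""
--
--     stats = {
--         'max_consecutive_wins': 0,
--         'max_consecutive_losses': 0,
--         'current_consecutive_wins': 0,
--         'current_consecutive_losses': 0
--     }
--
--     if not trades:
--         return stats
--
--     consecutive_wins = 0
--     consecutive_losses = 0
--
--     for trade in trades:
--         if 'pnl' not in trade: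
--             continue
--
--         if trade['pnl'] > 0:
--             consecutive_wins += 1
--             consecutive_losses = 0
--             stats['max_consecutive_wins'] = max(stats['max_consecutive_wins'],
--                                               consecutive_wins)
--         elif trade['pnl'] < 0:
--             consecutive_losses += 1
--             consecutive_wins = 0
--             stats['max_consecutive_losses'] = max(stats['max_consecutive_losses'],
--                                                  consecutive_losses)
--
--     stats['current_consecutive_wins'] = consecutive_wins
--     stats['current_consecutive_losses'] = consecutive_losses
--
--     return stats
-- ===== SOURCE B (Python) =====
-- from itertools import groupby
--
-- def _calculate_consecutive_stats(trades):
--     """Consecutive win/loss stats: filter to win/loss tokens, groupby into runs."""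
--     signs = [t['pnl'] > 0 for t in trades if 'pnl' in t and t['pnl'] != 0]
--     runs = [(k, sum(1 for _ in g)) for k, g in groupby(signs)]
--     max_w = max((n for k, n in runs if k), default=0)
--     max_l = max((n for k, n in runs if not k), default=0)
--     cur_w = runs[-1][1] if runs and runs[-1][0] else 0
--     cur_l = runs[-1][1] if runs and not runs[-1][0] else 0
--     return {
--         'max_consecutive_wins': max_w,
--         'max_consecutive_losses': max_l,
--         'current_consecutive_wins': cur_w,
--         'current_consecutive_losses': cur_l,
--     }
-- ===== Notes on version B (the rewrite author's own statement) =====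
-- stated objective: alternative
-- what changed: Replaces the stateful four-counter scan with a declarative pipeline: classify trades to win/loss tokens, group them into consecutive runs (itertools.groupby), then read the maxima and the trailing run off the run list.
import Mathlib
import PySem

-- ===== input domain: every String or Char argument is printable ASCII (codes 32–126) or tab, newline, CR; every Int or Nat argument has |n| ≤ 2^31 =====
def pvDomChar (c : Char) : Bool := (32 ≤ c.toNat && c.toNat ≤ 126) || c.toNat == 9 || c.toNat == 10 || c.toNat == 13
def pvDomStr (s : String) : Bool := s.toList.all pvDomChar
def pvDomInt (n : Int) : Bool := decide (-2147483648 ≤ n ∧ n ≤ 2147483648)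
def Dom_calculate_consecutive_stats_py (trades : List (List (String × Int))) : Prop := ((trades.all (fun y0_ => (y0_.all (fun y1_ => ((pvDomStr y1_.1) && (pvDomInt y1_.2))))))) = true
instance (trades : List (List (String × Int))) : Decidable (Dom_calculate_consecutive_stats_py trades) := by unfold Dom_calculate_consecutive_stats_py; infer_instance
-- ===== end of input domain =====

-- B replaces A's stateful four-counter scan by a pipeline: classify trades to win/loss
-- tokens, group them into consecutive runs, and read maxima and trailing run off the runs
-- (alternative decomposition, same O(n) cost).


-- ===== PORT A =====
-- one loop iteration of A: skip if 'pnl' missing, then the >0 / <0 / else chain,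
-- mutating the stats dict's max entries and the two counters (state = (stats, cw, cl))
def pvStepA (s : PySem.Dict String Int × Int × Int) (trade : List (String × Int)) :
    PySem.Dict String Int × Int × Int :=
  match trade.find? (fun kv => kv.1 == "pnl") with
  | none => s
  | some kv =>
    if kv.2 > 0 then
      (s.1.insert "max_consecutive_wins" (max (s.1.getD "max_consecutive_wins" 0) (s.2.1 + 1)),
       s.2.1 + 1, 0)
    else if kv.2 < 0 then
      (s.1.insert "max_consecutive_losses" (max (s.1.getD "max_consecutive_losses" 0) (s.2.2 + 1)),
       0, s.2.2 + 1)
    else s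

def calculate_consecutive_stats_py (trades : List (List (String × Int))) : List (String × Int) :=
  let stats : PySem.Dict String Int := PySem.Dict.mk
    [("max_consecutive_wins", 0), ("max_consecutive_losses", 0),
     ("current_consecutive_wins", 0), ("current_consecutive_losses", 0)]
  if trades = [] then stats.items
  else
    let r := trades.foldl pvStepA (stats, 0, 0)
    ((r.1.insert "current_consecutive_wins" r.2.1).insert "current_consecutive_losses" r.2.2).items

-- ===== PORT B =====
-- 't['pnl'] > 0 for t in trades if 'pnl' in t and t['pnl'] != 0' (one comprehension entry)
def pvClassify (t : List (String × Int)) : Option Bool :=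
  match t.find? (fun kv => kv.1 == "pnl") with
  | some kv => if kv.2 ≠ 0 then some (decide (0 < kv.2)) else none
  | none => none

-- itertools.groupby step: runs accumulated in reverse, head = current run with its length
def pvGroupStep (acc : List (Bool × Int)) (b : Bool) : List (Bool × Int) :=
  match acc with
  | [] => [(b, 1)]
  | (b', n) :: t => if b = b' then (b', n + 1) :: t else (b, 1) :: (b', n) :: t

def calculate_consecutive_stats_py_alt (trades : List (List (String × Int))) : List (String × Int) :=
  let signs := trades.filterMap pvClassify
  let runs := (signs.foldl pvGroupStep []).reverse
  let maxW := PySem.List.maxD ((runs.filter (fun r => r.1)).map (·.2)) (fun x => x) 0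
  let maxL := PySem.List.maxD ((runs.filter (fun r => !r.1)).map (·.2)) (fun x => x) 0
  let curW := match runs.getLast? with | some (true, n) => n | _ => 0
  let curL := match runs.getLast? with | some (false, n) => n | _ => 0
  [("max_consecutive_wins", maxW), ("max_consecutive_losses", maxL),
   ("current_consecutive_wins", curW), ("current_consecutive_losses", curL)]

-- ===== PRECONDITION & SPEC =====
def Spec_calculate_consecutive_stats_py (trades : List (List (String × Int))) (out : List (String × Int)) : Prop := out = calculate_consecutive_stats_py_alt trades
instance (trades : List (List (String × Int))) (out : List (String × Int)) : Decidable (Spec_calculate_consecutive_stats_py trades out) := by unfold Spec_calculate_consecutive_stats_py; infer_instance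

-- ===== CLAIM (what is proved, stated in full; the proofs are below) =====
def Claim_equal_calculate_consecutive_stats_py : Prop := ∀ (trades : List (List (String × Int))), Dom_calculate_consecutive_stats_py trades → Spec_calculate_consecutive_stats_py trades (calculate_consecutive_stats_py trades)

-- ===== LEMMAS AND PROOFS =====

-- A's stats dict always keeps this shape: the two max entries, currents still 0
def pvMkStats (mw ml : Int) : PySem.Dict String Int :=
  PySem.Dict.mk
    [("max_consecutive_wins", mw), ("max_consecutive_losses", ml),
     ("current_consecutive_wins", 0), ("current_consecutive_losses", 0)]

-- A's loop body restricted to the classified sign; state = (cw, cl, mw, ml)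
def pvQStep (q : Int × Int × Int × Int) (b : Bool) : Int × Int × Int × Int :=
  if b then (q.1 + 1, 0, max q.2.2.1 (q.1 + 1), q.2.2.2)
  else (0, q.2.1 + 1, q.2.2.1, max q.2.2.2 (q.2.1 + 1))

-- stats read off a reversed run list (head = current run)
def pvMaxW : List (Bool × Int) → Int
  | [] => 0
  | (b, n) :: t => if b then max n (pvMaxW t) else pvMaxW t

def pvMaxL : List (Bool × Int) → Int
  | [] => 0
  | (b, n) :: t => if b then pvMaxL t else max n (pvMaxL t)

def pvCur (b : Bool) : List (Bool × Int) → Int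
  | [] => 0
  | (b', n) :: _ => if b' = b then n else 0

-- max over a list with neutral 0, peeling from the head
def pvM : List Int → Int
  | [] => 0
  | x :: t => max x (pvM t)

lemma pvStepA_mk (mw ml cw cl : Int) (trade : List (String × Int)) :
    pvStepA (pvMkStats mw ml, cw, cl) trade =
      match pvClassify trade with
      | none => (pvMkStats mw ml, cw, cl)
      | some true => (pvMkStats (max mw (cw + 1)) ml, cw + 1, 0)
      | some false => (pvMkStats mw (max ml (cl + 1)), 0, cl + 1) := by
  unfold pvStepA pvClassify
  cases h : trade.find? (fun kv => kv.1 == "pnl") with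
  | none => rfl
  | some kv =>
    rcases lt_trichotomy kv.2 0 with hn | hz | hp
    · have h1 : ¬ kv.2 > 0 := by omega
      have h2 : kv.2 ≠ 0 := by omega
      have h3 : ¬ 0 < kv.2 := by omega
      simp [h1, hn, h2, pvMkStats, PySem.Dict.insert, PySem.Dict.getD, PySem.Dict.get?]
    · simp [hz]
    · have h2 : kv.2 ≠ 0 := by omega
      simp [hp, h2, pvMkStats, PySem.Dict.insert, PySem.Dict.getD, PySem.Dict.get?]

-- Lemma 1: A's fold over trades is the quadruple fold over the classified signs
lemma pvFoldA_eq (ts : List (List (String × Int))) :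
    ∀ (cw cl mw ml : Int),
      ts.foldl pvStepA (pvMkStats mw ml, cw, cl) =
        (fun q => (pvMkStats q.2.2.1 q.2.2.2, q.1, q.2.1))
          ((ts.filterMap pvClassify).foldl pvQStep (cw, cl, mw, ml)) := by
  induction ts with
  | nil => intro cw cl mw ml; rfl
  | cons t ts ih =>
    intro cw cl mw ml
    rw [List.foldl_cons, pvStepA_mk]
    cases h : pvClassify t with
    | none => simp [h, ih]
    | some b =>
      cases b <;>
        simp [h, ih, pvQStep]

-- Lemma 2: the quadruple fold tracks the grouping fold
lemma pvQStep_group (acc : List (Bool × Int)) (b : Bool) :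
    pvQStep (pvCur true acc, pvCur false acc, pvMaxW acc, pvMaxL acc) b =
      (pvCur true (pvGroupStep acc b), pvCur false (pvGroupStep acc b),
       pvMaxW (pvGroupStep acc b), pvMaxL (pvGroupStep acc b)) := by
  cases acc with
  | nil => cases b <;> simp [pvQStep, pvGroupStep, pvCur, pvMaxW, pvMaxL]
  | cons p t =>
    obtain ⟨b', n⟩ := p
    cases b <;> cases b' <;>
      simp [pvQStep, pvGroupStep, pvCur, pvMaxW, pvMaxL] <;> omega

lemma pvFoldQ_eq (s : List Bool) :
    ∀ (acc : List (Bool × Int)),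
      s.foldl pvQStep (pvCur true acc, pvCur false acc, pvMaxW acc, pvMaxL acc) =
        (pvCur true (s.foldl pvGroupStep acc), pvCur false (s.foldl pvGroupStep acc),
         pvMaxW (s.foldl pvGroupStep acc), pvMaxL (s.foldl pvGroupStep acc)) := by
  induction s with
  | nil => intro acc; rfl
  | cons b s ih =>
    intro acc
    rw [List.foldl_cons, pvQStep_group, List.foldl_cons, ih]

-- run lengths produced by the grouping fold are ≥ 1
lemma pvGroup_pos (s : List Bool) :
    ∀ (acc : List (Bool × Int)), (∀ p ∈ acc, 1 ≤ p.2) →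
      ∀ p ∈ s.foldl pvGroupStep acc, 1 ≤ p.2 := by
  induction s with
  | nil => intro acc h; exact h
  | cons b s ih =>
    intro acc h
    rw [List.foldl_cons]
    apply ih
    intro p hp
    cases acc with
    | nil =>
      simp only [pvGroupStep, List.mem_singleton] at hp
      subst hp; norm_num
    | cons q t =>
      obtain ⟨b', n⟩ := q
      have hn : (1:Int) ≤ n := h (b', n) (by simp)
      by_cases hb : b = b'
      · simp only [pvGroupStep, if_pos hb] at hp
        rcases List.mem_cons.mp hp with rfl | hmem
        · show (1:Int) ≤ n + 1; omega
        · exact h p (List.mem_cons_of_mem _ hmem)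
      · simp only [pvGroupStep, if_neg hb] at hp
        rcases List.mem_cons.mp hp with rfl | hmem
        · norm_num
        · exact h p hmem

lemma pvM_append (l : List Int) (x : Int) : pvM (l ++ [x]) = max (pvM l) x := by
  induction l with
  | nil => simp [pvM, max_comm]
  | cons y t ih => simp [pvM, ih, max_assoc]

lemma pvM_reverse (l : List Int) : pvM l.reverse = pvM l := by
  induction l with
  | nil => rfl
  | cons y t ih => rw [List.reverse_cons, pvM_append, ih, pvM, max_comm]

lemma pvFoldl_max_eq (t : List Int) :
    ∀ x : Int, 0 ≤ x → List.foldl max x t = max x (pvM t) := by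
  induction t with
  | nil => intro x hx; simp [pvM, hx]
  | cons y s ih =>
    intro x hx
    rw [List.foldl_cons, ih (max x y) (le_trans hx (le_max_left _ _)), pvM, max_assoc]

lemma pvMaxD_eq (l : List Int) (h : ∀ y ∈ l, 0 ≤ y) :
    PySem.List.maxD l (fun x => x) 0 = pvM l := by
  cases l with
  | nil => rfl
  | cons x t =>
    have hx : (0:Int) ≤ x := h x (by simp)
    simp only [PySem.List.maxD, PySem.List.max?_id_cons, Option.getD_some]
    rw [pvFoldl_max_eq t x hx, pvM]

lemma pvMaxW_eq_pvM (l : List (Bool × Int)) :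
    pvMaxW l = pvM ((l.filter (fun r => r.1)).map (·.2)) := by
  induction l with
  | nil => rfl
  | cons p t ih =>
    obtain ⟨b, n⟩ := p
    cases b <;> simp [pvMaxW, pvM, ih]

lemma pvMaxL_eq_pvM (l : List (Bool × Int)) :
    pvMaxL l = pvM ((l.filter (fun r => !r.1)).map (·.2)) := by
  induction l with
  | nil => rfl
  | cons p t ih =>
    obtain ⟨b, n⟩ := p
    cases b <;> simp [pvMaxL, pvM, ih]

-- ===== VERDICT (by name: the statement is the Claim_ definition above) =====
theorem calculate_consecutive_stats_py_spec : Claim_equal_calculate_consecutive_stats_py := by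
  unfold Claim_equal_calculate_consecutive_stats_py
  intro trades _
  unfold Spec_calculate_consecutive_stats_py
  unfold calculate_consecutive_stats_py calculate_consecutive_stats_py_alt
  cases trades with
  | nil => rfl
  | cons t ts =>
    simp only [if_neg (List.cons_ne_nil t ts)]
    have h0 : PySem.Dict.mk
        [("max_consecutive_wins", (0:Int)), ("max_consecutive_losses", 0),
         ("current_consecutive_wins", 0), ("current_consecutive_losses", 0)] = pvMkStats 0 0 := rfl
    rw [h0, pvFoldA_eq]
    have h1 : ((0:Int), (0:Int), (0:Int), (0:Int)) =
        (pvCur true [], pvCur false [], pvMaxW [], pvMaxL []) := rfl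
    rw [h1, pvFoldQ_eq]
    set racc := ((t :: ts).filterMap pvClassify).foldl pvGroupStep [] with hracc
    have hpos : ∀ p ∈ racc, (1:Int) ≤ p.2 :=
      pvGroup_pos _ [] (by intro p hp; simp at hp) 
    -- the dict side: items of the two final inserts on pvMkStats
    have hitems : ∀ mw ml cw cl : Int,
        (((pvMkStats mw ml).insert "current_consecutive_wins" cw).insert
            "current_consecutive_losses" cl).items =
          [("max_consecutive_wins", mw), ("max_consecutive_losses", ml),
           ("current_consecutive_wins", cw), ("current_consecutive_losses", cl)] := by
      intro mw ml cw cl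
      simp [pvMkStats, PySem.Dict.insert]
    rw [hitems]
    -- B side: rewrite maxD / getLast? through the reversed accumulator
    have hmw : PySem.List.maxD ((racc.reverse.filter (fun r => r.1)).map (·.2)) (fun x => x) 0
        = pvMaxW racc := by
      have hnn : ∀ y ∈ (racc.reverse.filter (fun r => r.1)).map (·.2), (0:Int) ≤ y := by
        intro y hy
        obtain ⟨p, hp, rfl⟩ := List.mem_map.mp hy
        have hmem : p ∈ racc := by
          have := List.mem_of_mem_filter hp
          simpa [List.mem_reverse] using this
        exact le_trans (by omega) (hpos p hmem)
      rw [pvMaxD_eq _ hnn, List.filter_reverse, List.map_reverse, pvM_reverse, pvMaxW_eq_pvM]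
    have hml : PySem.List.maxD ((racc.reverse.filter (fun r => !r.1)).map (·.2)) (fun x => x) 0
        = pvMaxL racc := by
      have hnn : ∀ y ∈ (racc.reverse.filter (fun r => !r.1)).map (·.2), (0:Int) ≤ y := by
        intro y hy
        obtain ⟨p, hp, rfl⟩ := List.mem_map.mp hy
        have hmem : p ∈ racc := by
          have := List.mem_of_mem_filter hp
          simpa [List.mem_reverse] using this
        exact le_trans (by omega) (hpos p hmem)
      rw [pvMaxD_eq _ hnn, List.filter_reverse, List.map_reverse, pvM_reverse, pvMaxL_eq_pvM]
    have hcw : (match racc.reverse.getLast? with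
        | some (true, n) => n | _ => (0:Int)) = pvCur true racc := by
      rw [List.getLast?_reverse]
      cases racc with
      | nil => rfl
      | cons p t => obtain ⟨b, n⟩ := p; cases b <;> simp [pvCur]
    have hcl : (match racc.reverse.getLast? with
        | some (false, n) => n | _ => (0:Int)) = pvCur false racc := by
      rw [List.getLast?_reverse]
      cases racc with
      | nil => rfl
      | cons p t => obtain ⟨b, n⟩ := p; cases b <;> simp [pvCur]
    simp only [hmw, hml, hcw, hcl]
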